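-- pv_equiv track=rewrite | github.com/bl1231/bilbomd | tools/python/pae2const.py | _sort_and_separate_cluster
-- ===== SOURCE A (Python) =====
-- def _sort_and_separate_cluster(numbers, chain_segs: list):
--     """
--     Sorts a list of numbers and separates them into contiguous regions.
--
--     A "region" is defined as a sequence of consecutive numbers in the sorted list.
--     The separation of regions occurs when a break in consecutiveness is detected,
--     or when a number is found in the `chain_segs` list, which acts as a separator.
--
--     Parameters:
--     -----------
--     numbers : list of int
--         A list of integers that needs to be sorted and separated into regions.
--
--     chain_segs : list of int
--         A list of integers that serve as separators. When a number from `numbers`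
--         is found in `chain_segs`, it causes a break in the region, even if the
--         numbers are otherwise consecutive.
--
--     Returns:
--     --------
--     list of list of int
--         A list of lists, where each inner list represents a contiguous region
--         of numbers, excluding any breaks caused by numbers in `chain_segs`.
--
--     Example:
--     --------
--     >>> PAEProcessor._sort_and_separate_cluster([1, 2, 3, 7, 8, 9, 11], [3, 8])
--     [[1, 2], [3], [7], [8, 9], [11]]
--     """
--     numbers = sorted(numbers)
--     regions = []
--     current_region = [numbers[0]]
--     for i in range(1, len(numbers)):
--         if (numbers[i] == numbers[i - 1] + 1) and (
--             numbers[i - 1] not in chain_segs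
--         ):
--             current_region.append(numbers[i])
--         else:
--             regions.append(current_region)
--             current_region = [numbers[i]]
--
--     regions.append(current_region)
--     return regions
-- ===== SOURCE B (Python) =====
-- def _sort_and_separate_cluster(numbers, chain_segs: list):
--     regions = []
--     for x in reversed(sorted(numbers)):
--         if regions and regions[0][0] == x + 1 and x not in chain_segs:
--             regions[0] = [x] + regions[0]
--         else:
--             regions = [[x]] + regions
--     return regions
-- ===== Notes on version B (the rewrite author's own statement) =====
-- stated objective: alternative
-- what changed: B builds the regions back-to-front in a single pass over the reversed sorted list, prepending each element to the first region or opening a new one, instead of A's index-based forward loop with a current-region accumulator.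
import Mathlib
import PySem

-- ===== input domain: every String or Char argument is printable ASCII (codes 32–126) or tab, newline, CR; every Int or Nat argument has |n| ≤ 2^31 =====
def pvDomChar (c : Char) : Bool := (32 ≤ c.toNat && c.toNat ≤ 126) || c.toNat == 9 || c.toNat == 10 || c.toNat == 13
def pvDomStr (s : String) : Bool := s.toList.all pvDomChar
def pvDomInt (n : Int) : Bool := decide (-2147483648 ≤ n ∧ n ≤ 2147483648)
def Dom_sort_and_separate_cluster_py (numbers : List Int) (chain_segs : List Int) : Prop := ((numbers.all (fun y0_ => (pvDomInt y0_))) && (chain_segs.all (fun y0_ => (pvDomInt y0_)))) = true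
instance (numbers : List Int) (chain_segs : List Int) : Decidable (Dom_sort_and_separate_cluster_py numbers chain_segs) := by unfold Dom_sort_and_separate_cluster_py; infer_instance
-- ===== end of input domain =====

-- B builds the regions back-to-front over the reversed sorted list (no index arithmetic);
-- equal to A on nonempty input, and B returns [] where A raises IndexError on [].

-- ===== PORT A =====
def sort_and_separate_cluster_py (numbers : List Int) (chain_segs : List Int) : List (List Int) :=
  let ns := PySem.List.sorted numbers (fun x => x)
  match PySem.List.pyGet? ns 0 with
  | none => []  -- numbers[0] raises IndexError on the empty list; excluded by Pre_
  | some x0 =>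
    let st := (PySem.List.pyRange 1 (ns.length : Int) 1).foldl
      (fun (st : List (List Int) × List Int) i =>
        if PySem.List.pyGetD ns i 0 = PySem.List.pyGetD ns (i - 1) 0 + 1 ∧
           PySem.List.pyGetD ns (i - 1) 0 ∉ chain_segs then
          (st.1, st.2 ++ [PySem.List.pyGetD ns i 0])
        else (st.1 ++ [st.2], [PySem.List.pyGetD ns i 0]))
      ([], [x0])
    st.1 ++ [st.2]

-- ===== PORT B =====
-- one loop-body step of Source B: prepend x to the first region or open a new one
def pvBStep (chain_segs : List Int) (regions : List (List Int)) (x : Int) : List (List Int) :=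
  match regions with
  | (y :: r) :: rs =>
      if y = x + 1 ∧ x ∉ chain_segs then (x :: y :: r) :: rs
      else [x] :: (y :: r) :: rs
  | _ => [x] :: regions  -- regions = []: open the first region (a regions with an empty first region never occurs)

def sort_and_separate_cluster_py_alt (numbers : List Int) (chain_segs : List Int) : List (List Int) :=
  ((PySem.List.sorted numbers (fun x => x)).reverse).foldl (pvBStep chain_segs) []

-- ===== PRECONDITION & SPEC =====
-- Pre_ excludes only the empty numbers list, on which A raises IndexError.
def Pre_sort_and_separate_cluster_py (numbers : List Int) (chain_segs : List Int) : Prop := numbers ≠ []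
instance (numbers : List Int) (chain_segs : List Int) : Decidable (Pre_sort_and_separate_cluster_py numbers chain_segs) := by unfold Pre_sort_and_separate_cluster_py; infer_instance
def pvWitness_sort_and_separate_cluster_py : List Int × List Int := ([1, 2, 3, 7, 8, 9, 11], [3, 8])

def Spec_sort_and_separate_cluster_py (numbers : List Int) (chain_segs : List Int) (out : List (List Int)) : Prop := out = sort_and_separate_cluster_py_alt numbers chain_segs
instance (numbers : List Int) (chain_segs : List Int) (out : List (List Int)) : Decidable (Spec_sort_and_separate_cluster_py numbers chain_segs out) := by unfold Spec_sort_and_separate_cluster_py; infer_instance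

-- ===== CLAIM (what is proved, stated in full; the proofs are below) =====
def Claim_equal_sort_and_separate_cluster_py : Prop := ∀ (numbers : List Int) (chain_segs : List Int), Dom_sort_and_separate_cluster_py numbers chain_segs → Pre_sort_and_separate_cluster_py numbers chain_segs → Spec_sort_and_separate_cluster_py numbers chain_segs (sort_and_separate_cluster_py numbers chain_segs)

-- ===== LEMMAS AND PROOFS =====

-- structural form of A's forward loop: (regions, current_region) over the rest of the list, prev = last consumed element
def pvALoop (cs : List Int) : List (List Int) → List Int → Int → List Int → List (List Int) × List Int
  | regions, cur, _, [] => (regions, cur)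
  | regions, cur, prev, y :: t =>
    if y = prev + 1 ∧ prev ∉ cs then pvALoop cs regions (cur ++ [y]) y t
    else pvALoop cs (regions ++ [cur]) [y] y t

-- structural form of B: fold of pvBStep from the back
def pvBRec (cs : List Int) : List Int → List (List Int)
  | [] => []
  | x :: l => pvBStep cs (pvBRec cs l) x

theorem pvB_eq_bRec (cs : List Int) (l : List Int) :
    (l.reverse).foldl (pvBStep cs) [] = pvBRec cs l := by
  induction l with
  | nil => rfl
  | cons x l ih =>
      simp [List.reverse_cons, List.foldl_append, ih, pvBRec]

theorem pvBRec_head (cs : List Int) (l : List Int) (x : Int) :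
    ∃ t rs, pvBRec cs (x :: l) = (x :: t) :: rs := by
  induction l generalizing x with
  | nil => exact ⟨[], [], rfl⟩
  | cons y l ih =>
      obtain ⟨t, rs, h⟩ := ih y
      by_cases hc : y = x + 1 ∧ x ∉ cs
      · refine ⟨y :: t, rs, ?_⟩
        show pvBStep cs (pvBRec cs (y :: l)) x = _
        rw [h]; simp only [pvBStep]; rw [if_pos hc]
      · refine ⟨[], (y :: t) :: rs, ?_⟩
        show pvBStep cs (pvBRec cs (y :: l)) x = _
        rw [h]; simp only [pvBStep]; rw [if_neg hc]

theorem pvALoop_eq (cs : List Int) (l : List Int) :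
    ∀ (regions : List (List Int)) (cur : List Int) (prev : Int) (t : List Int) (rs : List (List Int)),
    pvBRec cs (prev :: l) = (prev :: t) :: rs →
    (pvALoop cs regions cur prev l).1 ++ [(pvALoop cs regions cur prev l).2]
      = regions ++ (cur ++ t) :: rs := by
  induction l with
  | nil =>
      intro regions cur prev t rs h
      have h2 : ((prev :: ([] : List Int)) :: ([] : List (List Int))) = (prev :: t) :: rs := h
      injection h2 with hA hB
      injection hA with _ hT
      rw [← hT, ← hB]
      simp [pvALoop]
  | cons y l ih =>
      intro regions cur prev t rs h
      obtain ⟨t', rs', h'⟩ := pvBRec_head cs l y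
      have hstep : pvBRec cs (prev :: y :: l) = pvBStep cs ((y :: t') :: rs') prev := by
        show pvBStep cs (pvBRec cs (y :: l)) prev = _
        rw [h']
      by_cases hc : y = prev + 1 ∧ prev ∉ cs
      · have h3 : pvBStep cs ((y :: t') :: rs') prev = (prev :: y :: t') :: rs' := by
          simp only [pvBStep]; rw [if_pos hc]
        have h2 := (h3.symm.trans (hstep.symm.trans h))
        injection h2 with hA hB
        injection hA with _ hT
        have hA2 : pvALoop cs regions cur prev (y :: l) = pvALoop cs regions (cur ++ [y]) y l := by
          simp only [pvALoop]; rw [if_pos hc]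
        rw [hA2, ih regions (cur ++ [y]) y t' rs' h', ← hT, ← hB]
        simp
      · have h3 : pvBStep cs ((y :: t') :: rs') prev = [prev] :: (y :: t') :: rs' := by
          simp only [pvBStep]; rw [if_neg hc]
        have h2 := (h3.symm.trans (hstep.symm.trans h))
        injection h2 with hA hB
        injection hA with _ hT
        have hA2 : pvALoop cs regions cur prev (y :: l) = pvALoop cs (regions ++ [cur]) [y] y l := by
          simp only [pvALoop]; rw [if_neg hc]
        rw [hA2, ih (regions ++ [cur]) [y] y t' rs' h', ← hT, ← hB]
        simp

-- A's indexed loop over range(k+1, len ns) equals the structural loop, when ns.drop k = prev :: l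
theorem pvAFold_eq (cs : List Int) (ns : List Int) (l : List Int) :
    ∀ (k : Nat) (prev : Int), ns.drop k = prev :: l →
    ∀ (regions : List (List Int)) (cur : List Int),
    (PySem.List.pyRange ((k : Int) + 1) (ns.length : Int) 1).foldl
      (fun (st : List (List Int) × List Int) i =>
        if PySem.List.pyGetD ns i 0 = PySem.List.pyGetD ns (i - 1) 0 + 1 ∧
           PySem.List.pyGetD ns (i - 1) 0 ∉ cs then
          (st.1, st.2 ++ [PySem.List.pyGetD ns i 0])
        else (st.1 ++ [st.2], [PySem.List.pyGetD ns i 0]))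
      (regions, cur)
      = pvALoop cs regions cur prev l := by
  induction l with
  | nil =>
      intro k prev hdrop regions cur
      have hlen : ns.length = k + 1 := by
        have h1 : (ns.drop k).length = 1 := by rw [hdrop]; rfl
        rw [List.length_drop] at h1
        have h2 : k < ns.length := by
          by_contra h
          rw [List.drop_eq_nil_of_le (by omega)] at hdrop
          exact absurd hdrop (by simp)
        omega
      rw [hlen, PySem.List.pyRange_one_eq_nil (by push_cast; omega)]
      rfl
  | cons y l ih =>
      intro k prev hdrop regions cur
      have hlen2 : k + 2 ≤ ns.length := by
        have h1 : (ns.drop k).length = l.length + 2 := by rw [hdrop]; simp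
        rw [List.length_drop] at h1
        omega
      have hk : ns[k]? = some prev := by
        have h0 : (ns.drop k)[0]? = ns[k + 0]? := List.getElem?_drop
        rw [hdrop] at h0; simpa using h0.symm
      have hk1 : ns[k + 1]? = some y := by
        have h0 : (ns.drop k)[1]? = ns[k + 1]? := List.getElem?_drop
        rw [hdrop] at h0; simpa using h0.symm
      have hget_prev : PySem.List.pyGetD ns ((k : Int) + 1 - 1) 0 = prev := by
        have he : ((k : Int) + 1 - 1) = ((k : Nat) : Int) := by omega
        rw [he, PySem.List.pyGetD_natCast, List.getD_eq_getElem?_getD, hk]; rfl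
      have hget_y : PySem.List.pyGetD ns ((k : Int) + 1) 0 = y := by
        have he : ((k : Int) + 1) = (((k + 1 : Nat)) : Int) := by push_cast; ring
        rw [he, PySem.List.pyGetD_natCast, List.getD_eq_getElem?_getD, hk1]; rfl
      have hdrop1 : ns.drop (k + 1) = y :: l := by
        have hdd : ns.drop (k + 1) = (ns.drop k).drop 1 := by
          rw [List.drop_drop]
        rw [hdd, hdrop]; rfl
      have hrw : ((k : Int) + 1 + 1) = (((k + 1 : Nat) : Int) + 1) := by push_cast; ring
      rw [PySem.List.pyRange_one_cons (by omega), List.foldl_cons]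
      simp only [hget_prev, hget_y]
      by_cases hc : y = prev + 1 ∧ prev ∉ cs
      · have hA2 : pvALoop cs regions cur prev (y :: l) = pvALoop cs regions (cur ++ [y]) y l := by
          simp only [pvALoop]; rw [if_pos hc]
        rw [if_pos hc, hrw, ih (k + 1) y hdrop1 regions (cur ++ [y]), hA2]
      · have hA2 : pvALoop cs regions cur prev (y :: l) = pvALoop cs (regions ++ [cur]) [y] y l := by
          simp only [pvALoop]; rw [if_neg hc]
        rw [if_neg hc, hrw, ih (k + 1) y hdrop1 (regions ++ [cur]) [y], hA2]

theorem pvSorted_ne_nil (numbers : List Int) (h : numbers ≠ []) :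
    PySem.List.sorted numbers (fun x => x) ≠ [] := by
  intro hs
  have hp := PySem.List.sorted_perm numbers (fun x : Int => x) false
  rw [hs] at hp
  exact h hp.symm.eq_nil

-- ===== VERDICT (by name: the statement is the Claim_ definition above) =====
theorem sort_and_separate_cluster_py_spec : Claim_equal_sort_and_separate_cluster_py := by
  intro numbers chain_segs _ hpre
  unfold Spec_sort_and_separate_cluster_py
  unfold sort_and_separate_cluster_py sort_and_separate_cluster_py_alt
  rw [pvB_eq_bRec]
  have hne := pvSorted_ne_nil numbers hpre
  cases hns : PySem.List.sorted numbers (fun x => x) with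
  | nil => exact absurd hns hne
  | cons x rest =>
      have hget : PySem.List.pyGet? (x :: rest) 0 = some x := by
        simp [PySem.List.pyGet?, PySem.List.pyIdx?]
      simp only [hget]
      have hdrop : (x :: rest).drop 0 = x :: rest := rfl
      have hfold := pvAFold_eq chain_segs (x :: rest) rest 0 x hdrop [] [x]
      simp only [Nat.cast_zero, zero_add] at hfold
      rw [hfold]
      obtain ⟨t, rs, hb⟩ := pvBRec_head chain_segs rest x
      rw [hb]
      have hfin := pvALoop_eq chain_segs rest [] [x] x t rs hb
      simpa using hfin
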